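-- pv_equiv track=rewrite | github.com/SeifedinS/Amharic-Text-Normalization | number_generator.py | splitByThousands
-- ===== SOURCE A (Python) =====
-- def splitByThousands(n):
--     assert(isinstance(n,(int, int)))
--     assert(0 <= n)
--     res = []
--     while n:
--         n, r = divmod(n, 1000)
--         res.append(r)
--     return res
-- ===== SOURCE B (Python) =====
-- def splitByThousands(n):
--     assert(isinstance(n,(int, int)))
--     assert(0 <= n)
--     if n == 0:
--         return []
--     s = str(int(n))
--     res = []
--     i = len(s)
--     while i > 0:
--         v = 0
--         for c in s[max(0, i - 3):i]:
--             v = v * 10 + (ord(c) - 48)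
--         res.append(v)
--         i -= 3
--     return res
-- ===== Notes on version B (the rewrite author's own statement) =====
-- stated objective: alternative
-- what changed: Replaces the divmod-by-1000 arithmetic loop with a right-to-left walk over the decimal string str(n), slicing three characters at a time and converting each slice to its value by a digit fold.
import Mathlib
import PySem

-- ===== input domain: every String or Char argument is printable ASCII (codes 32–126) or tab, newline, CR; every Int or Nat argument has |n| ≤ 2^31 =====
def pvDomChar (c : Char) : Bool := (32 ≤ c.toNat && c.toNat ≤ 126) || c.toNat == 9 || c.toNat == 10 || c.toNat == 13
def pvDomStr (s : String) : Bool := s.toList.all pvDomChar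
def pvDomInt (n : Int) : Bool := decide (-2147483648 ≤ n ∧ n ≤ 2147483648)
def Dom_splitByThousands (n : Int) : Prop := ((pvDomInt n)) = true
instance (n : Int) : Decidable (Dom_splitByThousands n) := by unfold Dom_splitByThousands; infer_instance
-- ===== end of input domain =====

-- B replaces A's divmod-by-1000 loop with a right-to-left walk over the decimal string of n,
-- taking three characters at a time and folding each slice into its value (objective: alternative).

-- ===== PORT A =====
-- Python's `while n:` runs under the assert 0 <= n, where it is `0 < n`; written so for termination.
def splitAuxA (n : Int) (res : List Int) : List Int :=
  if _h : 0 < n then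
    splitAuxA (PySem.Int.floordiv n 1000) (res ++ [PySem.Int.mod n 1000])
  else res
termination_by n.toNat
decreasing_by
  have h1 : PySem.Int.floordiv n 1000 = n / 1000 := PySem.Int.floordiv_eq_ediv_of_pos (by omega)
  rw [h1]; omega

def splitByThousands (n : Int) : List Int := splitAuxA n []

-- ===== PORT B =====
-- the inner `for c in slice: v = v*10 + (ord(c)-48)` loop
def chunkVal (cs : List Char) : Int :=
  cs.foldl (fun v c => v * 10 + ((c.toNat : Int) - 48)) 0

-- the `while i > 0` loop of Source B (i : Nat since i starts at len(s) and `i -= 3` below 0 ends the loop)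
def splitAuxB (cs : List Char) (i : Nat) (res : List Int) : List Int :=
  if 0 < i then
    splitAuxB cs (i - 3)
      (res ++ [chunkVal (PySem.List.slice cs (some (max 0 ((i : Int) - 3))) (some (i : Int)))])
  else res
termination_by i

def splitByThousands_alt (n : Int) : List Int :=
  if n = 0 then []
  else
    let s := PySem.Int.toChars n   -- str(int(n))
    splitAuxB s s.length []

-- ===== PRECONDITION & SPEC =====
-- Pre_ excludes exactly n < 0, where A's `assert 0 <= n` raises AssertionError.
def Pre_splitByThousands (n : Int) : Prop := 0 ≤ n
instance (n : Int) : Decidable (Pre_splitByThousands n) := by unfold Pre_splitByThousands; infer_instance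
def pvWitness_splitByThousands : Int := 1234567

def Spec_splitByThousands (n : Int) (out : List Int) : Prop := out = splitByThousands_alt n
instance (n : Int) (out : List Int) : Decidable (Spec_splitByThousands n out) := by unfold Spec_splitByThousands; infer_instance

-- ===== CLAIM (what is proved, stated in full; the proofs are below) =====
def Claim_equal_splitByThousands : Prop := ∀ (n : Int), Dom_splitByThousands n → Pre_splitByThousands n → Spec_splitByThousands n (splitByThousands n)

-- ===== LEMMAS AND PROOFS =====

-- reference decomposition: base-1000 groups, least significant first
def grps (m : Nat) : List Int :=
  if h : m = 0 then [] else ((m % 1000 : Nat) : Int) :: grps (m / 1000)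
decreasing_by omega

-- fuel-free characterisation of Nat.toDigits 10
def rep10 (n : Nat) : List Char :=
  if _h : n < 10 then [Nat.digitChar n]
  else rep10 (n / 10) ++ [Nat.digitChar (n % 10)]
decreasing_by omega

lemma rep10_eq (n : Nat) : rep10 n =
    if n < 10 then [Nat.digitChar n] else rep10 (n / 10) ++ [Nat.digitChar (n % 10)] := by
  rw [rep10]; split <;> simp_all

lemma toDigitsCore_eq_rep10 (f : Nat) : ∀ n l, n < f →
    Nat.toDigitsCore 10 f n l = rep10 n ++ l := by
  induction f with
  | zero => intro n l h; omega
  | succ f ih =>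
    intro n l h
    rw [Nat.toDigitsCore]
    by_cases h10 : n / 10 = 0
    · have hn : n < 10 := by omega
      rw [if_pos h10, rep10_eq n, if_pos hn, Nat.mod_eq_of_lt hn]
      rfl
    · have hn : ¬ n < 10 := by omega
      rw [if_neg h10, ih (n / 10) _ (by omega)]
      rw [rep10_eq n, if_neg hn, List.append_assoc]
      rfl

lemma toDigits_eq_rep10 (n : Nat) : Nat.toDigits 10 n = rep10 n := by
  have := toDigitsCore_eq_rep10 (n + 1) n [] (by omega)
  simpa [Nat.toDigits] using this

lemma splitAuxA_eq (n : Int) (res : List Int) : splitAuxA n res =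
    if 0 < n then splitAuxA (PySem.Int.floordiv n 1000) (res ++ [PySem.Int.mod n 1000]) else res := by
  rw [splitAuxA]; split <;> simp_all

lemma splitAuxB_eq (cs : List Char) (i : Nat) (res : List Int) : splitAuxB cs i res =
    if 0 < i then
      splitAuxB cs (i - 3)
        (res ++ [chunkVal (PySem.List.slice cs (some (max 0 ((i : Int) - 3))) (some (i : Int)))])
    else res := by
  rw [splitAuxB]

lemma grps_eq (m : Nat) : grps m =
    if m = 0 then [] else ((m % 1000 : Nat) : Int) :: grps (m / 1000) := by
  rw [grps]; split <;> simp_all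

lemma digitChar_toNat {d : Nat} (h : d < 10) : ((Nat.digitChar d).toNat : Int) = 48 + d := by
  interval_cases d <;> rfl

-- the 3-char zero-padded representation of r < 1000
def pad3 (r : Nat) : List Char :=
  [Nat.digitChar (r / 100), Nat.digitChar (r / 10 % 10), Nat.digitChar (r % 10)]

lemma chunkVal_pad3 {r : Nat} (h : r < 1000) : chunkVal (pad3 r) = (r : Int) := by
  simp only [pad3, chunkVal, List.foldl]
  rw [digitChar_toNat (by omega), digitChar_toNat (by omega), digitChar_toNat (by omega)]
  have h2 : r / 100 * 100 + r / 10 % 10 * 10 + r % 10 = r := by omega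
  push_cast
  linarith [congrArg (fun x : Nat => (x : Int)) h2]

lemma rep10_decomp {m : Nat} (h : 1000 ≤ m) :
    rep10 m = rep10 (m / 1000) ++ pad3 (m % 1000) := by
  rw [rep10_eq m, if_neg (by omega)]
  rw [rep10_eq (m / 10), if_neg (by omega)]
  rw [rep10_eq (m / 10 / 10), if_neg (by omega)]
  have h1 : m / 10 / 10 / 10 = m / 1000 := by omega
  have h2 : m / 10 / 10 % 10 = m % 1000 / 100 := by omega
  have h3 : m / 10 % 10 = m % 1000 / 10 % 10 := by omega
  have h4 : m % 10 = m % 1000 % 10 := by omega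
  rw [h1, h2, h3, h4]
  simp [pad3]

lemma chunkVal_rep10 {m : Nat} (h : m < 1000) : chunkVal (rep10 m) = (m : Int) := by
  by_cases h1 : m < 10
  · rw [rep10_eq m, if_pos h1]
    simp only [chunkVal, List.foldl]
    rw [digitChar_toNat h1]; ring
  · by_cases h2 : m < 100
    · rw [rep10_eq m, if_neg h1, rep10_eq (m / 10), if_pos (by omega)]
      simp only [chunkVal, List.cons_append, List.nil_append, List.foldl]
      rw [digitChar_toNat (by omega), digitChar_toNat (by omega)]
      have h3 : m / 10 * 10 + m % 10 = m := by omega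
      push_cast
      linarith [congrArg (fun x : Nat => (x : Int)) h3]
    · rw [rep10_eq m, if_neg h1, rep10_eq (m / 10), if_neg (by omega),
        rep10_eq (m / 10 / 10), if_pos (by omega)]
      simp only [chunkVal, List.cons_append, List.nil_append, List.foldl]
      rw [digitChar_toNat (by omega), digitChar_toNat (by omega), digitChar_toNat (by omega)]
      have h3 : m / 10 / 10 * 100 + m / 10 % 10 * 10 + m % 10 = m := by omega
      push_cast
      linarith [congrArg (fun x : Nat => (x : Int)) h3]

lemma rep10_length_pos (m : Nat) : 0 < (rep10 m).length := by
  rw [rep10_eq m]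
  split <;> simp

lemma rep10_length_le {m : Nat} (h : m < 1000) : (rep10 m).length ≤ 3 := by
  by_cases h1 : m < 10
  · rw [rep10_eq m, if_pos h1]; simp
  · by_cases h2 : m < 100
    · rw [rep10_eq m, if_neg h1, rep10_eq (m / 10), if_pos (by omega)]; simp
    · rw [rep10_eq m, if_neg h1, rep10_eq (m / 10), if_neg (by omega),
        rep10_eq (m / 10 / 10), if_pos (by omega)]
      simp

lemma splitAuxA_grps : ∀ (m : Nat) (res : List Int),
    splitAuxA (m : Int) res = res ++ grps m := by
  intro m
  induction m using Nat.strong_induction_on with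
  | _ m ih =>
    intro res
    by_cases h : m = 0
    · subst h
      rw [splitAuxA_eq, if_neg (by omega), grps_eq, if_pos rfl, List.append_nil]
    · rw [splitAuxA_eq, if_pos (by exact_mod_cast Nat.pos_of_ne_zero h)]
      have hfd : PySem.Int.floordiv (m : Int) 1000 = ((m / 1000 : Nat) : Int) := by
        exact_mod_cast PySem.Int.floordiv_natCast m 1000
      have hmd : PySem.Int.mod (m : Int) 1000 = ((m % 1000 : Nat) : Int) := by
        exact_mod_cast PySem.Int.mod_natCast m 1000
      rw [hfd, hmd, ih (m / 1000) (by omega)]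
      rw [grps_eq m, if_neg h]
      simp

lemma splitAuxB_grps : ∀ (m : Nat), 1 ≤ m → ∀ (tail : List Char) (res : List Int),
    splitAuxB (rep10 m ++ tail) (rep10 m).length res = res ++ grps m := by
  intro m
  induction m using Nat.strong_induction_on with
  | _ m ih =>
    intro hm tail res
    by_cases h : m < 1000
    · have hlen : 0 < (rep10 m).length := rep10_length_pos m
      have hle : (rep10 m).length ≤ 3 := rep10_length_le h
      rw [splitAuxB_eq, if_pos hlen]
      have hmax : max 0 (((rep10 m).length : Int) - 3) = ((0 : Nat) : Int) := by
        simp; omega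
      rw [hmax, PySem.List.slice_natCast, List.drop_zero, Nat.sub_zero,
        List.take_append_of_le_length (le_refl _), List.take_length]
      rw [splitAuxB_eq, if_neg (by omega)]
      rw [chunkVal_rep10 h]
      rw [grps_eq m, if_neg (by omega), grps_eq (m / 1000), if_pos (by omega)]
      have hc : ((m % 1000 : Nat) : Int) = (m : Int) := by
        congr 1; omega
      rw [hc]
    · -- m ≥ 1000 : peel the last three characters
      have hd := rep10_decomp (by omega : 1000 ≤ m)
      have hq1 : 1 ≤ m / 1000 := by omega
      have hXpos : 0 < (rep10 (m / 1000)).length := rep10_length_pos _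
      have hlenm : (rep10 m).length = (rep10 (m / 1000)).length + 3 := by
        rw [hd]; simp [pad3]
      rw [hlenm, splitAuxB_eq, if_pos (by omega)]
      have hmax : max 0 ((((rep10 (m / 1000)).length + 3 : Nat) : Int) - 3)
          = (((rep10 (m / 1000)).length : Nat) : Int) := by
        push_cast; simp
      rw [hmax]
      have hcast : (((rep10 (m / 1000)).length + 3 : Nat) : Int)
          = (((rep10 (m / 1000)).length : Nat) : Int) + ((3 : Nat) : Int) := by push_cast; ring
      rw [hcast, PySem.List.slice_natCast_add]
      have hsl : ((rep10 m ++ tail).drop (rep10 (m / 1000)).length).take 3 = pad3 (m % 1000) := by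
        rw [hd, List.append_assoc, List.drop_left]
        rw [show (3 : Nat) = (pad3 (m % 1000)).length from by simp [pad3], List.take_left]
      rw [hsl, chunkVal_pad3 (by omega)]
      have hsub : (rep10 (m / 1000)).length + 3 - 3 = (rep10 (m / 1000)).length := by omega
      rw [hsub, hd, List.append_assoc]
      rw [ih (m / 1000) (by omega) hq1 (pad3 (m % 1000) ++ tail)
        (res ++ [((m % 1000 : Nat) : Int)])]
      rw [grps_eq m, if_neg (by omega)]
      simp

-- ===== VERDICT (by name: the statement is the Claim_ definition above) =====
theorem splitByThousands_spec : Claim_equal_splitByThousands := by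
  intro n _ hpre
  unfold Spec_splitByThousands splitByThousands splitByThousands_alt
  by_cases h0 : n = 0
  · subst h0
    rw [splitAuxA_eq, if_neg (by omega), if_pos rfl]
  · rw [if_neg h0]
    have hn : 0 < n := lt_of_le_of_ne hpre (Ne.symm h0)
    have hnat : n = ((n.toNat : Nat) : Int) := by omega
    have htc : PySem.Int.toChars n = rep10 n.toNat := by
      unfold PySem.Int.toChars
      rw [if_neg (by omega), toDigits_eq_rep10]
    have hA : splitAuxA n [] = grps n.toNat := by
      have h1 := splitAuxA_grps n.toNat []
      rw [List.nil_append, ← hnat] at h1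
      exact h1
    have hB : splitAuxB (PySem.Int.toChars n) (PySem.Int.toChars n).length [] = grps n.toNat := by
      have h2 := splitAuxB_grps n.toNat (by omega) [] []
      rw [List.append_nil, List.nil_append] at h2
      rw [htc, h2]
    rw [hA, hB]
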